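-- pv_equiv track=rewrite | github.com/antoniokhemmoro7/Courtside-Data-Analytics-Project | calculate_team_travel.py | build_team_schedules
-- ===== SOURCE A (Python) =====
-- def build_team_schedules(games):
--     schedules = {}
--
--     for game_id, date, home_team, away_team in games:
--
--         # Home team plays at home arena
--         schedules.setdefault(home_team, []).append((date, game_id, True))
--
--         # Away team travels to home arena
--         schedules.setdefault(away_team, []).append((date, game_id, False))
--
--     # Sort by date
--     for team in schedules:
--         schedules[team].sort(key=lambda x: x[0])
--
--     return schedules
-- ===== SOURCE B (Python) =====
-- def _game_entries(team, game):
--     game_id, date, home, away = game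
--     out = []
--     if home == team:
--         out.append((date, game_id, True))
--     if away == team:
--         out.append((date, game_id, False))
--     return out
--
--
-- def build_team_schedules(games):
--     # Sort once, globally and stably, by date; per-team lists are then
--     # already date-ordered, so no per-team sort is needed.
--     order = sorted(games, key=lambda g: g[1])
--     teams = list(dict.fromkeys(t for _, _, h, a in games for t in (h, a)))
--     return {t: [e for g in order for e in _game_entries(t, g)] for t in teams}
-- ===== Notes on version B (the rewrite author's own statement) =====
-- stated objective: alternative
-- what changed: Instead of growing per-team lists in a dict and stably sorting each one afterwards, B stably sorts the games once by date, lists the distinct teams in first-appearance order, and builds each team's schedule by one comprehension over the pre-sorted games.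
import Mathlib
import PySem

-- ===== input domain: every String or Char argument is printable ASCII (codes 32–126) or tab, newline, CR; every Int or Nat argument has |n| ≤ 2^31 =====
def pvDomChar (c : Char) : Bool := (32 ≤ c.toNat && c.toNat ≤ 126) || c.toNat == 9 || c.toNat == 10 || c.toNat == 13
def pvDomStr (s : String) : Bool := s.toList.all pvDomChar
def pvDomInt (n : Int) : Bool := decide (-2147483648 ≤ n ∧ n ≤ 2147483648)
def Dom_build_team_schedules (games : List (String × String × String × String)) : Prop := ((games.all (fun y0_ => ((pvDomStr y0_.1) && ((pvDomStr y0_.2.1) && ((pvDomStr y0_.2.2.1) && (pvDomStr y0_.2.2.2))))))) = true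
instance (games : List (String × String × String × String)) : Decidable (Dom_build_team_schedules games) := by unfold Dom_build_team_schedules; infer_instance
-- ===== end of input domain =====

-- B sorts the games once, stably, by date and builds each team's schedule by one
-- comprehension over the pre-sorted games (no dict mutation, no per-team sorts);
-- objective: alternative decomposition of the same result.


-- ===== PORT A =====
-- Python A: build schedules dict via setdefault(...).append(...), then sort each
-- team's list stably by date, iterating over the dict's keys.
def build_team_schedules (games : List (String × String × String × String)) : List (String × List (String × String × Bool)) :=
  let schedules : PySem.Dict String (List (String × String × Bool)) :=
    games.foldl (fun sch g =>
      let sch := PySem.Dict.modify (PySem.Dict.setdefault sch g.2.2.1 []) g.2.2.1 []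
                   (fun l => l ++ [(g.2.1, g.1, true)])
      PySem.Dict.modify (PySem.Dict.setdefault sch g.2.2.2 []) g.2.2.2 []
                   (fun l => l ++ [(g.2.1, g.1, false)]))
      PySem.Dict.empty
  ((PySem.Dict.keys schedules).foldl
      (fun sch t => PySem.Dict.modify sch t [] (fun l => PySem.List.sorted l (fun x => x.1)))
      schedules).items

-- ===== PORT B =====
-- Source B helper _game_entries
def gameEntries (t : String) (g : String × String × String × String) : List (String × String × Bool) :=
  (if g.2.2.1 == t then [(g.2.1, g.1, true)] else []) ++
  (if g.2.2.2 == t then [(g.2.1, g.1, false)] else [])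

def build_team_schedules_alt (games : List (String × String × String × String)) : List (String × List (String × String × Bool)) :=
  let order := PySem.List.sorted games (fun g => g.2.1)
  let teams := PySem.List.dedup (games.flatMap (fun g => [g.2.2.1, g.2.2.2]))
  teams.map (fun t => (t, order.flatMap (gameEntries t)))

-- ===== PRECONDITION & SPEC =====
def Spec_build_team_schedules (games : List (String × String × String × String)) (out : List (String × List (String × String × Bool))) : Prop := out = build_team_schedules_alt games
instance (games : List (String × String × String × String)) (out : List (String × List (String × String × Bool))) : Decidable (Spec_build_team_schedules games out) := by unfold Spec_build_team_schedules; infer_instance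

-- ===== CLAIM (what is proved, stated in full; the proofs are below) =====
def Claim_equal_build_team_schedules : Prop := ∀ (games : List (String × String × String × String)), Dom_build_team_schedules games → Spec_build_team_schedules games (build_team_schedules games)

-- ===== LEMMAS AND PROOFS =====

-- abbreviations for the proofs
def teamsOf (gs : List (String × String × String × String)) : List String :=
  PySem.List.dedup (gs.flatMap (fun g => [g.2.2.1, g.2.2.2]))

def entriesOf (t : String) (gs : List (String × String × String × String)) : List (String × String × Bool) :=
  gs.flatMap (gameEntries t)

-- A team that occurs in no game has no entries
lemma entriesOf_of_not_mem (t : String) (gs : List (String × String × String × String))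
    (h : t ∉ gs.flatMap (fun g => [g.2.2.1, g.2.2.2])) : entriesOf t gs = [] := by
  induction gs with
  | nil => rfl
  | cons g gs ih =>
    simp only [List.flatMap_cons, List.mem_append, List.mem_cons] at h
    push_neg at h
    have h1 : (g.2.2.1 == t) = false := by simp [h.1.1.symm]
    have h2 : (g.2.2.2 == t) = false := by
      have := h.1.2.1
      simp [Ne.symm this]
    simp only [entriesOf, List.flatMap_cons, gameEntries, h1, h2]
    simpa [entriesOf] using ih (by intro hm; exact h.2 hm)

lemma find?_map_mem (T : List String) (f : String → List (String × String × Bool))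
    (h : String) (hmem : h ∈ T) :
    (T.map (fun t => (t, f t))).find? (fun p => p.1 == h) = some (h, f h) := by
  induction T with
  | nil => cases hmem
  | cons t T ih =>
    by_cases ht : t = h
    · subst ht; simp [List.find?]
    · have : (t == h) = false := by simp [ht]
      simp only [List.map_cons, List.find?, this]
      have hm' : h ∈ T := by
        rcases List.mem_cons.mp hmem with h' | h'
        · exact absurd h'.symm ht
        · exact h'
      exact ih hm'

lemma contains_map_iff (T : List String) (f : String → List (String × String × Bool)) (h : String) :
    (PySem.Dict.contains (PySem.Dict.mk (T.map (fun t => (t, f t)))) h) = true ↔ h ∈ T := by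
  simp [PySem.Dict.contains, List.any_eq_true]

-- one setdefault+append step on a dict in map form
lemma stepEntry (T : List String) (f : String → List (String × String × Bool))
    (h : String) (e : String × String × Bool) (hf : h ∉ T → f h = []) :
    (PySem.Dict.modify (PySem.Dict.setdefault (PySem.Dict.mk (T.map (fun t => (t, f t)))) h []) h []
        (fun l => l ++ [e]))
      = PySem.Dict.mk ((PySem.Set.add T h).map (fun t => (t, if t = h then f h ++ [e] else f t))) := by
  by_cases hm : h ∈ T
  · have hc : (PySem.Dict.contains (PySem.Dict.mk (T.map (fun t => (t, f t)))) h) = true :=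
      (contains_map_iff T f h).mpr hm
    have hadd : PySem.Set.add T h = T := by
      simp [PySem.Set.add, PySem.Set.contains, hm]
    have hsd : PySem.Dict.setdefault (PySem.Dict.mk (T.map (fun t => (t, f t)))) h []
        = PySem.Dict.mk (T.map (fun t => (t, f t))) := by
      simp [PySem.Dict.setdefault, hc]
    have hget : PySem.Dict.getD (PySem.Dict.mk (T.map (fun t => (t, f t)))) h [] = f h := by
      simp [PySem.Dict.getD, PySem.Dict.get?, find?_map_mem T f h hm]
    have hins : PySem.Dict.insert (PySem.Dict.mk (T.map (fun t => (t, f t)))) h (f h ++ [e])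
        = PySem.Dict.mk (T.map (fun t => (t, if t = h then f h ++ [e] else f t))) := by
      simp only [PySem.Dict.insert, hc, if_true]
      congr 1
      show List.map _ (List.map _ T) = _
      rw [List.map_map]
      apply List.map_congr_left
      intro t _
      by_cases ht : t = h
      · simp [ht]
      · simp [ht]
    rw [hadd]
    simp only [PySem.Dict.modify, hsd, hget]
    exact hins
  · have hc : (PySem.Dict.contains (PySem.Dict.mk (T.map (fun t => (t, f t)))) h) = false := by
      rw [← Bool.not_eq_true]; rw [contains_map_iff]; exact hm
    have hadd : PySem.Set.add T h = T ++ [h] := by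
      simp [PySem.Set.add, PySem.Set.contains, hm]
    have hfind : (T.map (fun t => (t, f t))).find? (fun p => p.1 == h) = none := by
      rw [List.find?_eq_none]
      intro p hp
      obtain ⟨t, htT, rfl⟩ := List.mem_map.mp hp
      intro hth
      have ht : t = h := by simpa using hth
      exact hm (ht ▸ htT)
    have hsd : PySem.Dict.setdefault (PySem.Dict.mk (T.map (fun t => (t, f t)))) h []
        = PySem.Dict.mk (T.map (fun t => (t, f t)) ++ [(h, [])]) := by
      simp [PySem.Dict.setdefault, hc]
    have hget : PySem.Dict.getD (PySem.Dict.mk (T.map (fun t => (t, f t)) ++ [(h, [])])) h []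
        = ([] : List (String × String × Bool)) := by
      simp [PySem.Dict.getD, PySem.Dict.get?, List.find?_append, hfind]
    have hc2 : (PySem.Dict.contains (PySem.Dict.mk (T.map (fun t => (t, f t)) ++ [(h, ([] : List (String × String × Bool)))])) h) = true := by
      simp [PySem.Dict.contains]
    have hins : PySem.Dict.insert (PySem.Dict.mk (T.map (fun t => (t, f t)) ++ [(h, [])])) h ([] ++ [e])
        = PySem.Dict.mk ((T ++ [h]).map (fun t => (t, if t = h then f h ++ [e] else f t))) := by
      simp only [PySem.Dict.insert, hc2, if_true]
      congr 1
      rw [List.map_append, List.map_append, List.map_map]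
      congr 1
      · apply List.map_congr_left
        intro t htT
        have ht : t ≠ h := fun hth => hm (hth ▸ htT)
        simp [ht]
      · simp [hf hm]
    rw [hadd]
    simp only [PySem.Dict.modify, hsd, hget]
    exact hins

-- phase 1: the build fold in map form
lemma build_loop (gs : List (String × String × String × String)) :
    gs.foldl (fun sch g =>
      let sch := PySem.Dict.modify (PySem.Dict.setdefault sch g.2.2.1 []) g.2.2.1 []
                   (fun l => l ++ [(g.2.1, g.1, true)])
      PySem.Dict.modify (PySem.Dict.setdefault sch g.2.2.2 []) g.2.2.2 []
                   (fun l => l ++ [(g.2.1, g.1, false)]))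
      PySem.Dict.empty
    = PySem.Dict.mk ((teamsOf gs).map (fun t => (t, entriesOf t gs))) := by
  induction gs using List.reverseRecOn with
  | nil => rfl
  | append_singleton gs g ih =>
    rw [List.foldl_append, ih, List.foldl_cons, List.foldl_nil]
    have hT : teamsOf (gs ++ [g]) = PySem.Set.add (PySem.Set.add (teamsOf gs) g.2.2.1) g.2.2.2 := by
      simp [teamsOf, PySem.List.dedup, PySem.Set.ofList, List.foldl_append]
    have hf1 : g.2.2.1 ∉ teamsOf gs → entriesOf g.2.2.1 gs = [] := by
      intro hm
      exact entriesOf_of_not_mem _ _ (by simpa [teamsOf, PySem.List.mem_dedup] using hm)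
    rw [stepEntry (teamsOf gs) (fun t => entriesOf t gs) g.2.2.1 (g.2.1, g.1, true) hf1]
    have hf2 : g.2.2.2 ∉ PySem.Set.add (teamsOf gs) g.2.2.1 →
        (if g.2.2.2 = g.2.2.1 then entriesOf g.2.2.1 gs ++ [(g.2.1, g.1, true)] else entriesOf g.2.2.2 gs) = [] := by
      intro hm
      rw [PySem.Set.mem_add] at hm
      push_neg at hm
      rw [if_neg hm.2]
      exact entriesOf_of_not_mem _ _ (by simpa [teamsOf, PySem.List.mem_dedup] using hm.1)
    rw [stepEntry (PySem.Set.add (teamsOf gs) g.2.2.1)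
        (fun t => if t = g.2.2.1 then entriesOf g.2.2.1 gs ++ [(g.2.1, g.1, true)] else entriesOf t gs)
        g.2.2.2 (g.2.1, g.1, false) hf2]
    rw [hT]
    congr 1
    apply List.map_congr_left
    intro t _
    congr 1
    have hE : entriesOf t (gs ++ [g]) = entriesOf t gs ++ gameEntries t g := by
      simp [entriesOf]
    rw [hE]
    by_cases h2 : t = g.2.2.2 <;> by_cases h1 : t = g.2.2.1
    · have ha : g.2.2.2 = g.2.2.1 := by rw [← h2]; exact h1
      have b1 : (g.2.2.1 == t) = true := by simp [h1.symm]
      have b2 : (g.2.2.2 == t) = true := by simp [h2.symm]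
      simp [gameEntries, b1, b2, h2, ha]
    · have ha : ¬ g.2.2.2 = g.2.2.1 := by rw [← h2]; exact h1
      have b1 : (g.2.2.1 == t) = false := by rw [beq_eq_false_iff_ne]; exact fun c => h1 c.symm
      have b2 : (g.2.2.2 == t) = true := by simp [h2.symm]
      have ha' : ¬ g.2.2.1 = g.2.2.2 := fun c => ha c.symm
      simp [gameEntries, b1, b2, h2, ha, ha']
    · have b1 : (g.2.2.1 == t) = true := by simp [h1.symm]
      have b2 : (g.2.2.2 == t) = false := by rw [beq_eq_false_iff_ne]; exact fun c => h2 c.symm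
      have ha : ¬ g.2.2.1 = g.2.2.2 := fun c => h2 (h1.trans c)
      have ha' : ¬ g.2.2.2 = g.2.2.1 := fun c => ha c.symm
      simp [gameEntries, b1, b2, h1, h2, ha, ha']
    · have b1 : (g.2.2.1 == t) = false := by rw [beq_eq_false_iff_ne]; exact fun c => h1 c.symm
      have b2 : (g.2.2.2 == t) = false := by rw [beq_eq_false_iff_ne]; exact fun c => h2 c.symm
      simp [gameEntries, b1, b2, h1, h2]

-- generic: modifying every key once, in key order, maps F over all values
lemma assoc_eq_of_nodup (L : List (String × List (String × String × Bool)))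
    (hL : (L.map Prod.fst).Nodup) {p q : String × List (String × String × Bool)}
    (hp : p ∈ L) (hq : q ∈ L) (hk : p.1 = q.1) : p = q := by
  induction L with
  | nil => cases hp
  | cons x L ih =>
    rw [List.map_cons, List.nodup_cons] at hL
    rcases List.mem_cons.mp hp with rfl | hp' <;> rcases List.mem_cons.mp hq with rfl | hq'
    · rfl
    · exact absurd (by rw [hk]; exact List.mem_map_of_mem hq') hL.1
    · exact absurd (by rw [← hk]; exact List.mem_map_of_mem hp') hL.1
    · exact ih hL.2 hp' hq'

lemma find?_assoc_mem (L : List (String × List (String × String × Bool)))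
    (hL : (L.map Prod.fst).Nodup) (p : String × List (String × String × Bool)) (hp : p ∈ L) :
    L.find? (fun q => q.1 == p.1) = some p := by
  induction L with
  | nil => cases hp
  | cons x L ih =>
    rw [List.map_cons, List.nodup_cons] at hL
    rcases List.mem_cons.mp hp with rfl | hp'
    · simp
    · have hx : ¬ ((x.1 == p.1) = true) := by
        simp only [beq_iff_eq]
        intro hxp
        exact hL.1 (by rw [hxp]; exact List.mem_map_of_mem hp')
      rw [List.find?_cons_of_neg (p := fun q => q.1 == p.1) (a := x) (l := L) hx]
      exact ih hL.2 hp'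

-- generic: modifying every key once, in key order, maps F over all values
lemma foldl_modify_keys (K : List String) (L : List (String × List (String × String × Bool)))
    (F : List (String × String × Bool) → List (String × String × Bool))
    (hK : K.Nodup) (hL : (L.map Prod.fst).Nodup) (hsub : ∀ k ∈ K, k ∈ L.map Prod.fst) :
    K.foldl (fun sch t => PySem.Dict.modify sch t [] F) (PySem.Dict.mk L)
      = PySem.Dict.mk (L.map (fun p => (p.1, if p.1 ∈ K then F p.2 else p.2))) := by
  induction K generalizing L with
  | nil => simp
  | cons k K ih =>
    obtain ⟨p, hpL, hpk⟩ := List.mem_map.mp (hsub k (List.mem_cons_self))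
    have hfind : L.find? (fun q => q.1 == k) = some p := by
      rw [← hpk]; exact find?_assoc_mem L hL p hpL
    have hc : (PySem.Dict.contains (PySem.Dict.mk L) k) = true := by
      simp only [PySem.Dict.contains, List.any_eq_true]
      exact ⟨p, hpL, by simp [hpk]⟩
    have hone : PySem.Dict.modify (PySem.Dict.mk L) k [] F
        = PySem.Dict.mk (L.map (fun q => if q.1 == k then (k, F p.2) else q)) := by
      simp only [PySem.Dict.modify, PySem.Dict.getD, PySem.Dict.get?, hfind, Option.map_some,
        Option.getD_some, PySem.Dict.insert, hc, if_true]
    have hkeys1 : (L.map (fun q => if q.1 == k then (k, F p.2) else q)).map Prod.fst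
        = L.map Prod.fst := by
      rw [List.map_map]
      apply List.map_congr_left
      intro q _
      by_cases hq : q.1 = k
      · simp [Function.comp_def, hq]
      · simp [Function.comp_def, hq]
    rw [List.foldl_cons, hone,
      ih _ hK.of_cons (by rw [hkeys1]; exact hL)
        (fun k' hk' => by rw [hkeys1]; exact hsub k' (List.mem_cons_of_mem _ hk'))]
    congr 1
    rw [List.map_map]
    apply List.map_congr_left
    intro q hqL
    by_cases hq : q.1 = k
    · have hqp : q = p := assoc_eq_of_nodup L hL hqL hpL (by rw [hq, hpk])
      have hk0 : k ∉ K := (List.nodup_cons.mp hK).1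
      subst hqp
      simp [Function.comp_def, List.mem_cons, hq, hk0]
    · simp only [Function.comp_def]
      rw [if_neg (by simp [hq] : ¬ ((q.1 == k) = true))]
      have : q.1 ∈ k :: K ↔ q.1 ∈ K := by simp [List.mem_cons, hq]
      rw [if_congr this rfl rfl]

-- phase 2: the key loop sorts every value in place
lemma sort_loop (T : List String) (f : String → List (String × String × Bool)) (hT : T.Nodup) :
    (PySem.Dict.keys (PySem.Dict.mk (T.map (fun t => (t, f t))))).foldl
      (fun sch t => PySem.Dict.modify sch t [] (fun l => PySem.List.sorted l (fun x => x.1)))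
      (PySem.Dict.mk (T.map (fun t => (t, f t))))
    = PySem.Dict.mk (T.map (fun t => (t, PySem.List.sorted (f t) (fun x => x.1)))) := by
  have hk0 : PySem.Dict.keys (PySem.Dict.mk (T.map (fun t => (t, f t))))
      = (T.map (fun t => (t, f t))).map Prod.fst := rfl
  have hkeys : (T.map (fun t => (t, f t))).map Prod.fst = T := by
    simp [List.map_map, Function.comp_def]
  rw [hk0, hkeys]
  rw [foldl_modify_keys T _ _ hT (by rw [hkeys]; exact hT) (by rw [hkeys]; exact fun k hk => hk)]
  congr 1
  rw [List.map_map]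
  apply List.map_congr_left
  intro t ht
  simp [ht]

-- insertBy passes over a prefix it does not go before
lemma insertBy_prefix {β : Type} (before : β → β → Bool) (x : β) (A L : List β)
    (hA : ∀ y ∈ A, before x y = false) :
    PySem.List.insertBy before x (A ++ L) = A ++ PySem.List.insertBy before x L := by
  induction A with
  | nil => rfl
  | cons a A ih =>
    have ha := hA a (List.mem_cons_self)
    simp only [List.cons_append, PySem.List.insertBy, ha, Bool.false_eq_true, if_false]
    rw [ih (fun y hy => hA y (List.mem_cons_of_mem _ hy))]

lemma insertBy_all_after {β : Type} (before : β → β → Bool) (x : β) (B : List β)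
    (hB : ∀ y ∈ B, before x y = true) :
    PySem.List.insertBy before x B = x :: B := by
  cases B with
  | nil => rfl
  | cons b B => simp [PySem.List.insertBy, hB b (List.mem_cons_self)]

-- inserting a block of equal-key elements between a ≤-prefix and a >-suffix
lemma foldl_insert_block (kb : (String × String × Bool) → String) (d : String)
    (es A B : List (String × String × Bool))
    (hA : ∀ b ∈ A, kb b ≤ d) (hB : ∀ b ∈ B, d < kb b) (hes : ∀ e ∈ es, kb e = d) :
    es.foldl (fun acc e => PySem.List.insertBy (fun a b => decide (kb a < kb b)) e acc) (A ++ B)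
      = A ++ es ++ B := by
  induction es generalizing A with
  | nil => simp
  | cons e es ih =>
    have hek : kb e = d := hes e (List.mem_cons_self)
    have h1 : PySem.List.insertBy (fun a b => decide (kb a < kb b)) e (A ++ B) = (A ++ [e]) ++ B := by
      rw [insertBy_prefix _ _ A B (fun y hy => by
        simp only [decide_eq_false_iff_not, not_lt, hek]; exact hA y hy)]
      rw [insertBy_all_after _ _ B (fun y hy => by
        simp only [decide_eq_true_eq, hek]; exact hB y hy)]
      simp
    rw [List.foldl_cons, h1, ih (A ++ [e]) (by
      intro b hb
      rcases List.mem_append.mp hb with hb | hb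
      · exact hA b hb
      · simp only [List.mem_singleton] at hb; subst hb; exact le_of_eq hek)
      (fun e' he' => hes e' (List.mem_cons_of_mem _ he'))]
    simp

lemma foldl_insert_prefix (kb : (String × String × Bool) → String)
    (es A L : List (String × String × Bool))
    (h : ∀ e ∈ es, ∀ y ∈ A, (decide (kb e < kb y)) = false) :
    es.foldl (fun acc e => PySem.List.insertBy (fun a b => decide (kb a < kb b)) e acc) (A ++ L)
      = A ++ es.foldl (fun acc e => PySem.List.insertBy (fun a b => decide (kb a < kb b)) e acc) L := by
  induction es generalizing L with
  | nil => rfl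
  | cons e es ih =>
    rw [List.foldl_cons, insertBy_prefix _ _ A L (h e (List.mem_cons_self)), List.foldl_cons]
    exact ih _ (fun e' he' => h e' (List.mem_cons_of_mem _ he'))

-- stable insertion of a game commutes with per-team expansion, on a sorted list
lemma flatMap_insertBy (t : String) (g : String × String × String × String)
    (S : List (String × String × String × String))
    (hs : S.Pairwise (fun a b => a.2.1 ≤ b.2.1)) :
    (PySem.List.insertBy (fun a b => decide (a.2.1 < b.2.1)) g S).flatMap (gameEntries t)
      = (gameEntries t g).foldl
          (fun acc e => PySem.List.insertBy (fun a b => decide (a.1 < b.1)) e acc)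
          (S.flatMap (gameEntries t)) := by
  have hkey : ∀ (a : String × String × String × String) (b : String × String × Bool),
      b ∈ gameEntries t a → b.1 = a.2.1 := by
    intro a b hb
    simp only [gameEntries, List.mem_append] at hb
    rcases hb with hb | hb <;> (split at hb <;> simp_all)
  induction S with
  | nil =>
    have hb := foldl_insert_block (kb := Prod.fst) g.2.1 (gameEntries t g) [] []
      (by simp) (by simp) (fun e he => hkey g e he)
    simpa [PySem.List.insertBy] using hb.symm
  | cons s S ih =>
    by_cases hc : g.2.1 < s.2.1
    · rw [insertBy_all_after _ _ (s :: S) ?hall]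
      case hall =>
        intro y hy
        simp only [decide_eq_true_eq]
        rcases List.mem_cons.mp hy with rfl | hy'
        · exact hc
        · exact lt_of_lt_of_le hc ((List.pairwise_cons.mp hs).1 y hy')
      rw [List.flatMap_cons]
      rw [show (s :: S).flatMap (gameEntries t) = [] ++ (s :: S).flatMap (gameEntries t) by simp]
      rw [foldl_insert_block (kb := Prod.fst) g.2.1 (gameEntries t g) [] _ (by simp) ?hB
        (fun e he => hkey g e he)]
      · simp
      case hB =>
        intro b hb
        show g.2.1 < b.1
        obtain ⟨a, haS, hba⟩ := List.mem_flatMap.mp hb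
        rw [hkey a b hba]
        rcases List.mem_cons.mp haS with rfl | ha'
        · exact hc
        · exact lt_of_lt_of_le hc ((List.pairwise_cons.mp hs).1 a ha')
    · have hstep : PySem.List.insertBy (fun a b => decide (a.2.1 < b.2.1)) g (s :: S)
          = s :: PySem.List.insertBy (fun a b => decide (a.2.1 < b.2.1)) g S := by
        simp [PySem.List.insertBy, hc]
      rw [hstep, List.flatMap_cons, ih (List.Pairwise.of_cons hs), List.flatMap_cons]
      rw [foldl_insert_prefix (kb := Prod.fst) (gameEntries t g) (gameEntries t s) _ ?hpre]
      case hpre =>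
        intro e he y hy
        show decide (e.1 < y.1) = false
        rw [hkey g e he, hkey s y hy]
        simp only [decide_eq_false_iff_not, not_lt]
        exact le_of_not_gt hc

-- phase 3: stable sort commutes with per-team expansion
lemma sorted_entries (t : String) (gs : List (String × String × String × String)) :
    PySem.List.sorted (entriesOf t gs) (fun x => x.1)
      = entriesOf t (PySem.List.sorted gs (fun g => g.2.1)) := by
  induction gs using List.reverseRecOn with
  | nil => rfl
  | append_singleton gs g ih =>
    have hL : entriesOf t (gs ++ [g]) = entriesOf t gs ++ gameEntries t g := by
      simp [entriesOf]
    rw [hL, PySem.List.sorted_eq_foldl_insertBy, List.foldl_append,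
      ← PySem.List.sorted_eq_foldl_insertBy, ih]
    rw [show PySem.List.sorted (gs ++ [g]) (fun g => g.2.1)
        = PySem.List.insertBy (fun a b => decide (a.2.1 < b.2.1)) g (PySem.List.sorted gs (fun g => g.2.1)) by
      rw [PySem.List.sorted_eq_foldl_insertBy, List.foldl_append, ← PySem.List.sorted_eq_foldl_insertBy]
      rfl]
    show _ = (PySem.List.insertBy (fun a b => decide (a.2.1 < b.2.1)) g (PySem.List.sorted gs (fun g => g.2.1))).flatMap (gameEntries t)
    rw [flatMap_insertBy t g _ (PySem.List.sorted_pairwise gs (fun g => g.2.1))]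
    rfl

-- ===== VERDICT (by name: the statement is the Claim_ definition above) =====
theorem build_team_schedules_spec : Claim_equal_build_team_schedules := by
  intro games _
  show build_team_schedules games = build_team_schedules_alt games
  have hnd : (teamsOf games).Nodup := PySem.List.nodup_dedup _
  simp only [build_team_schedules, build_team_schedules_alt]
  rw [build_loop, sort_loop (teamsOf games) (fun t => entriesOf t games) hnd]
  show ((teamsOf games).map (fun t => (t, PySem.List.sorted (entriesOf t games) (fun x => x.1))))
      = (teamsOf games).map (fun t => (t, (PySem.List.sorted games (fun g => g.2.1)).flatMap (gameEntries t)))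
  apply List.map_congr_left
  intro t _
  rw [sorted_entries]
  rfl
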